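-- pv_equiv track=rewrite | github.com/pranavsomawar17/MINIASSEMBLER | core/debugger.py | debug
-- ===== SOURCE A (Python) =====
-- def debug(program):
--
--     debug_info = []
--
--     pc = 0
--
--     for line in program:
--
--         line = line.strip()
--
--         # =============================
--         # Ignore empty lines
--         # =============================
--         if not line:
--             continue
--
--         # =============================
--         # Ignore comments
--         # =============================
--         if line.startswith(";"):
--             continue
--
--         # Remove inline comments
--         if ";" in line:
--             line = line.split(";")[0].strip()
--
--         # =============================
--         # Ignore directives
--         # =============================
--         if (
--             line.startswith("START")
--             or line == "END"
--         ):
--             continue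
--
--         # =============================
--         # Ignore data declarations
--         # =============================
--         if "DC" in line or "DS" in line:
--             continue
--
--         debug_info.append(
--             f"PC {pc} -> {line}"
--         )
--
--         pc += 1
--
--     return debug_info
-- ===== SOURCE B (Python) =====
-- def debug(program):
--     # Phase 1: consume the lines back-to-front with an explicit stack,
--     # cleaning each line in one shot: cut at the first ';' (find + slice),
--     # then strip; survivors pile up in reverse order on `pending`.
--     stack = list(program)
--     pending = []
--     while stack:
--         raw = stack.pop()
--         cut = raw.find(";")
--         text = (raw if cut < 0 else raw[:cut]).strip()
--         if (
--             text
--             and not text.startswith("START")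
--             and text != "END"
--             and "DC" not in text
--             and "DS" not in text
--         ):
--             pending.append(text)
--     # Phase 2: pop the pending stack (restoring source order); the PC of
--     # each entry is simply the number of entries already emitted.
--     trace = []
--     while pending:
--         trace.append("PC {} -> {}".format(len(trace), pending.pop()))
--     return trace
-- ===== Notes on version B (the rewrite author's own statement) =====
-- stated objective: alternative
-- what changed: Replaces A's single forward loop (strip, early-continue guard chain, conditional split(';'), manual pc counter) by two explicit stack loops: a backward pop loop that cleans each line in one shot with find(';')+slice+strip and one conjunctive keep test, then a second pop loop that numbers the survivors using len(trace) instead of a counter.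
import Mathlib
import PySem

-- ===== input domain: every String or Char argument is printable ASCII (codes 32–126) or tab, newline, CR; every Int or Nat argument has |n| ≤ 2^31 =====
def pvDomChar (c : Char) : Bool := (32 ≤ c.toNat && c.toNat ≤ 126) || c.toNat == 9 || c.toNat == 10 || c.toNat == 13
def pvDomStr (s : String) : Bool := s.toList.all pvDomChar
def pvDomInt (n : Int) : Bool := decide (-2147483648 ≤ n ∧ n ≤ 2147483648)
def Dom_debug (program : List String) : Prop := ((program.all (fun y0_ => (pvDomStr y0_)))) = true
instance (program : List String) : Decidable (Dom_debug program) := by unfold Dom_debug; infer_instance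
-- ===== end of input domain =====

-- B replaces A's single forward filter-and-count loop (strip, guard chain,
-- conditional split(';'), manual pc counter) by two explicit stack loops:
-- a backward pop loop cleaning each line via find(';')+slice+strip, then a
-- numbering pop loop using the output length; same values, no speed claim.

-- shared formatting helper: f"PC {pc} -> {line}"
def fmtPC (pc : Int) (line : String) : String :=
  "PC " ++ PySem.Int.toStr pc ++ " -> " ++ line

-- ===== PORT A =====
-- one step of A's for-loop over (debug_info, pc)
def debugStep (st : List String × Int) (raw : String) : List String × Int :=
  let line := PySem.Str.strip raw
  if line = "" then st
  else if PySem.Str.startswith line ";" then st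
  else
    let line := if PySem.Str.isIn ";" line
                then PySem.Str.strip ((((PySem.Str.split? line ";").getD []).headD ""))
                else line
    if PySem.Str.startswith line "START" || line = "END" then st
    else if PySem.Str.isIn "DC" line || PySem.Str.isIn "DS" line then st
    else (st.1 ++ [fmtPC st.2 line], st.2 + 1)

def debug (program : List String) : List String :=
  (program.foldl debugStep ([], 0)).1

-- ===== PORT B =====
-- body of B's first while loop: pop raw from the stack's end (the loop walks the
-- program back to front), cut at the first ';' (find + slice), strip, keep survivors
def pendStep (pending : List String) (raw : String) : List String :=
  let cut := PySem.Str.find raw ";"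
  let text := PySem.Str.strip (if cut < 0 then raw else PySem.Str.slice raw none (some cut))
  if (!(text == "") && !PySem.Str.startswith text "START" && !(text == "END")
      && !PySem.Str.isIn "DC" text && !PySem.Str.isIn "DS" text)
  then pending ++ [text] else pending

-- body of B's second while loop: pop from pending's end, number by the trace length
def traceStep (trace : List String) (s : String) : List String :=
  trace ++ [fmtPC (trace.length : Int) s]

def debug_alt (program : List String) : List String :=
  let pending := program.reverse.foldl pendStep []
  pending.reverse.foldl traceStep []

-- ===== PRECONDITION & SPEC =====
def Spec_debug (program : List String) (out : List String) : Prop := out = debug_alt program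
instance (program : List String) (out : List String) : Decidable (Spec_debug program out) := by unfold Spec_debug; infer_instance

-- ===== CLAIM (what is proved, stated in full; the proofs are below) =====
def Claim_equal_debug : Prop := ∀ (program : List String), Dom_debug program → Spec_debug program (debug program)

-- ===== LEMMAS AND PROOFS =====

-- A's per-line cleaning, as an Option (none = the line is dropped)
def cleanA (raw : String) : Option String :=
  let line := PySem.Str.strip raw
  if line = "" then none
  else if PySem.Str.startswith line ";" then none
  else
    let line := if PySem.Str.isIn ";" line
                then PySem.Str.strip ((((PySem.Str.split? line ";").getD []).headD ""))
                else line
    if PySem.Str.startswith line "START" || line = "END" then none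
    else if PySem.Str.isIn "DC" line || PySem.Str.isIn "DS" line then none
    else some line

-- the candidate text B computes for a line
def textB (raw : String) : String :=
  PySem.Str.strip (if PySem.Str.find raw ";" < 0 then raw
                   else PySem.Str.slice raw none (some (PySem.Str.find raw ";")))

-- B's per-line cleaning, as an Option
def cleanB (raw : String) : Option String :=
  let text := textB raw
  if (!(text == "") && !PySem.Str.startswith text "START" && !(text == "END")
      && !PySem.Str.isIn "DC" text && !PySem.Str.isIn "DS" text)
  then some text else none

-- A's pre-guard candidate: none iff dropped as blank/comment, else the cleaned line
def candA (raw : String) : Option String :=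
  let line := PySem.Str.strip raw
  if line = "" then none
  else if PySem.Str.startswith line ";" then none
  else some (if PySem.Str.isIn ";" line
             then PySem.Str.strip ((((PySem.Str.split? line ";").getD []).headD ""))
             else line)

-- chars before the first ';'
def TW (cs : List Char) : List Char := cs.takeWhile (fun c => !(c == ';'))

def wsOnly (l : List Char) : Prop := ∀ c ∈ l, PySem.Chars.isspace c = true

-- ---------- generic char-list facts ----------

theorem semi_infix_iff (cs : List Char) : [';'] <:+: cs ↔ ';' ∈ cs := by
  constructor
  · intro h; exact h.sublist.subset (by simp)
  · intro h
    obtain ⟨s, t, rfl⟩ := List.append_of_mem h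
    exact ⟨s, t, by simp⟩

theorem semi_prefix_iff (cs : List Char) : [';'] <+: cs ↔ ∃ t, cs = ';' :: t := by
  constructor
  · rintro ⟨t, rfl⟩; exact ⟨t, rfl⟩
  · rintro ⟨t, rfl⟩; exact ⟨t, rfl⟩

theorem head_dropWhile_false {p : Char → Bool} :
    ∀ (l : List Char) {c : Char} {t : List Char}, l.dropWhile p = c :: t → p c = false := by
  intro l
  induction l with
  | nil => intro c t h; simp at h
  | cons a l ih =>
    intro c t h
    rw [List.dropWhile_cons] at h
    by_cases hp : p a = true
    · rw [if_pos hp] at h; exact ih h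
    · rw [if_neg hp] at h
      cases h
      simpa using hp

-- ---------- strip decomposition ----------

theorem strip_split (cs : List Char) :
    ∃ w v, cs = w ++ PySem.Chars.strip cs ++ v ∧ wsOnly w ∧ wsOnly v ∧
      cs.dropWhile PySem.Chars.isspace = PySem.Chars.strip cs ++ v := by
  refine ⟨cs.takeWhile PySem.Chars.isspace,
          ((cs.dropWhile PySem.Chars.isspace).reverse.takeWhile PySem.Chars.isspace).reverse,
          ?_, ?_, ?_, ?_⟩
  · conv_lhs => rw [← List.takeWhile_append_dropWhile (p := PySem.Chars.isspace) (l := cs)]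
    rw [List.append_assoc]
    congr 1
    simp only [PySem.Chars.strip, PySem.Chars.lstrip, PySem.Chars.rstrip]
    conv_lhs => rw [← List.reverse_reverse (cs.dropWhile PySem.Chars.isspace),
      ← List.takeWhile_append_dropWhile (p := PySem.Chars.isspace)
        (l := (cs.dropWhile PySem.Chars.isspace).reverse)]
    rw [List.reverse_append]
  · intro c hc; exact List.mem_takeWhile_imp hc
  · intro c hc; rw [List.mem_reverse] at hc; exact List.mem_takeWhile_imp hc
  · simp only [PySem.Chars.strip, PySem.Chars.lstrip, PySem.Chars.rstrip]
    conv_lhs => rw [← List.reverse_reverse (cs.dropWhile PySem.Chars.isspace),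
      ← List.takeWhile_append_dropWhile (p := PySem.Chars.isspace)
        (l := (cs.dropWhile PySem.Chars.isspace).reverse)]
    rw [List.reverse_append]

theorem strip_ws_prefix (w x : List Char) (hw : wsOnly w) :
    PySem.Chars.strip (w ++ x) = PySem.Chars.strip x := by
  simp only [PySem.Chars.strip, PySem.Chars.lstrip]
  rw [List.dropWhile_append, List.dropWhile_eq_nil_iff.mpr hw]
  simp

theorem strip_ws (w : List Char) (hw : wsOnly w) : PySem.Chars.strip w = [] := by
  have := strip_ws_prefix w [] hw
  simpa using this

theorem strip_nil_iff (cs : List Char) : PySem.Chars.strip cs = [] ↔ wsOnly cs := by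
  constructor
  · intro h
    obtain ⟨w, v, hcs, hw, hv, -⟩ := strip_split cs
    intro c hc
    rw [hcs, h] at hc
    simp only [List.append_nil, List.mem_append] at hc
    rcases hc with h1 | h1
    · exact hw c h1
    · exact hv c h1
  · exact strip_ws cs

theorem strip_cons_nonws (c : Char) (t : List Char) (hc : PySem.Chars.isspace c = false) :
    PySem.Chars.strip (c :: t) ≠ [] := by
  intro h
  have := (strip_nil_iff _).mp h c (by simp)
  rw [hc] at this
  exact absurd this (by simp)

theorem mem_strip {x : Char} {cs : List Char} (h : x ∈ PySem.Chars.strip cs) : x ∈ cs := by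
  obtain ⟨w, v, hcs, -, -, -⟩ := strip_split cs
  rw [hcs]
  simp [h]

-- ---------- TW facts ----------

theorem TW_ws_append (w x : List Char) (hw : wsOnly w) : TW (w ++ x) = w ++ TW x := by
  unfold TW
  rw [List.takeWhile_append]
  have h1 : w.takeWhile (fun c => !(c == ';')) = w := by
    apply List.takeWhile_eq_self_iff.mpr
    intro c hc
    have hs := hw c hc
    have : c ≠ ';' := by
      intro e; rw [e] at hs; exact absurd hs (by decide)
    simp [this]
  rw [h1]
  simp

theorem TW_stop (m v : List Char) (hm : ';' ∈ m) : TW (m ++ v) = TW m := by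
  unfold TW
  rw [List.takeWhile_append, if_neg]
  intro hlen
  have heq : m.takeWhile (fun c => !(c == ';')) = m :=
    (List.takeWhile_prefix _).eq_of_length hlen
  have := List.takeWhile_eq_self_iff.mp heq ';' hm
  simp at this

-- ---------- splitOn with separator ";" : the first piece ----------

theorem splitOn_go_semi (fuel : Nat) :
    ∀ (cs cur : List Char) (acc : List (List Char)), cs.length < fuel →
      ∃ tail, PySem.Chars.splitOn.go [';'] fuel cs cur acc
        = acc.reverse ++ (cur.reverse ++ TW cs) :: tail := by
  induction fuel with
  | zero => intro cs cur acc h; omega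
  | succ n ih =>
    intro cs cur acc h
    cases cs with
    | nil =>
      refine ⟨[], ?_⟩
      rw [PySem.Chars.splitOn.go.eq_def]
      simp [TW]
    | cons c rest =>
      rw [PySem.Chars.splitOn.go.eq_def]
      by_cases hc : c = ';'
      · subst hc
        have hpre : [';'].isPrefixOf (';' :: rest) = true := by simp [List.isPrefixOf]
        simp only [hpre, if_true]
        obtain ⟨tail, ht⟩ := ih rest [] (cur.reverse :: acc)
          (by simpa using Nat.lt_of_succ_lt_succ h)
        refine ⟨TW rest :: tail, ?_⟩
        simp only [List.length_cons, List.length_nil, List.drop_succ_cons, List.drop_zero]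
        rw [ht]
        simp [TW]
      · have hpre : [';'].isPrefixOf (c :: rest) = false := by
          simp [List.isPrefixOf]
          exact fun e => absurd e.symm hc
        simp only [hpre, Bool.false_eq_true, if_false]
        obtain ⟨tail, ht⟩ := ih rest (c :: cur) acc (by simpa using Nat.lt_of_succ_lt_succ h)
        refine ⟨tail, ?_⟩
        rw [ht]
        have : TW (c :: rest) = c :: TW rest := by
          unfold TW; rw [List.takeWhile_cons, if_pos (by simp [hc])]
        rw [this]
        simp

theorem splitOn_semi (cs : List Char) :
    ∃ tail, PySem.Chars.splitOn cs [';'] = TW cs :: tail := by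
  obtain ⟨t, ht⟩ := splitOn_go_semi (cs.length + 1) cs [] [] (Nat.lt_succ_self _)
  refine ⟨t, ?_⟩
  unfold PySem.Chars.splitOn
  simpa using ht

-- ---------- find ";" and take ----------

theorem take_first_semi :
    ∀ (cs : List Char) (k : Nat), cs[k]? = some ';' → (∀ i, i < k → cs[i]? ≠ some ';') →
      cs.take k = TW cs := by
  intro cs
  induction cs with
  | nil => intro k h _; simp at h
  | cons c rest ih =>
    intro k hk hmin
    cases k with
    | zero =>
      simp only [List.getElem?_cons_zero, Option.some_inj] at hk
      subst hk
      unfold TW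
      simp
    | succ j =>
      have hc : c ≠ ';' := by
        have := hmin 0 (by omega)
        simpa using this
      have hrec := ih j (by simpa using hk)
        (fun i hi => by have := hmin (i + 1) (by omega); simpa using this)
      unfold TW
      rw [List.take_succ_cons, List.takeWhile_cons, if_pos (by simp [hc])]
      unfold TW at hrec
      rw [hrec]

theorem find_semi_take (cs : List Char) (h0 : 0 ≤ PySem.Chars.find cs [';']) :
    cs.take (PySem.Chars.find cs [';']).toNat = TW cs := by
  obtain ⟨hpre, hmin⟩ := PySem.Chars.find_spec h0
  apply take_first_semi
  · obtain ⟨t, hcons⟩ := (semi_prefix_iff _).mp hpre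
    have hh := List.head?_drop (l := cs) (i := (PySem.Chars.find cs [';']).toNat)
    rw [hcons] at hh
    exact hh.symm
  · intro i hi hsome
    apply hmin i hi
    rw [semi_prefix_iff]
    have hh := List.head?_drop (l := cs) (i := i)
    rw [hsome] at hh
    cases hd : cs.drop i with
    | nil => rw [hd] at hh; simp at hh
    | cons a t =>
      rw [hd] at hh
      simp only [List.head?_cons, Option.some_inj] at hh
      exact ⟨t, by rw [hh]⟩

theorem find_semi_neg_iff (cs : List Char) :
    PySem.Chars.find cs [';'] = -1 ↔ ';' ∉ cs := by
  rw [PySem.Chars.find_eq_neg_one_iff, semi_infix_iff]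

-- ---------- the candidate equality (the crux) ----------

theorem str_eq_empty_iff (s : String) : s = "" ↔ s.toList = [] := by
  constructor
  · intro h; simp [h]
  · intro h; exact String.ext (by simpa using h)

theorem cand_eq (raw : String) :
    (if textB raw = "" then none else some (textB raw)) = candA raw := by
  have hsl : (";" : String).toList = [';'] := by decide
  by_cases hmem : ';' ∈ raw.toList
  · -- a semicolon occurs in raw
    have hne : PySem.Chars.find raw.toList [';'] ≠ -1 := by
      intro h; exact (find_semi_neg_iff _).mp h hmem
    have h0 : 0 ≤ PySem.Chars.find raw.toList [';'] := by
      have := PySem.Chars.neg_one_le_find (s := raw.toList) (sub := [';'])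
      omega
    have hfind : PySem.Str.find raw ";" = PySem.Chars.find raw.toList [';'] := by
      simp [PySem.Str.find, hsl]
    have hcut : ¬ (PySem.Str.find raw ";" < 0) := by rw [hfind]; omega
    have htextL : (textB raw).toList = PySem.Chars.strip (TW raw.toList) := by
      unfold textB
      rw [if_neg hcut]
      simp only [PySem.Str.strip, PySem.Str.slice, String.toList_ofList,
        PySem.Chars.slice_eq_listSlice, hfind]
      rw [PySem.List.slice_to _ h0, find_semi_take _ h0]
    obtain ⟨w, v, hcs, hw, hv, hdrop⟩ := strip_split raw.toList
    have hmem_m : ';' ∈ PySem.Chars.strip raw.toList := by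
      rw [hcs] at hmem
      simp only [List.mem_append] at hmem
      rcases hmem with (h1 | h1) | h1
      · exact absurd (hw _ h1) (by decide)
      · exact h1
      · exact absurd (hv _ h1) (by decide)
    have hlineL : (PySem.Str.strip raw).toList = PySem.Chars.strip raw.toList := by
      simp [PySem.Str.strip]
    have hm_ne : PySem.Chars.strip raw.toList ≠ [] := by
      intro h; rw [h] at hmem_m; simp at hmem_m
    have hline_ne : PySem.Str.strip raw ≠ "" := by
      intro h; apply hm_ne; rw [← hlineL, h]; rfl
    unfold candA
    rw [if_neg hline_ne]
    by_cases hstart : ∃ t, PySem.Chars.strip raw.toList = ';' :: t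
    · -- the stripped line is a comment: both sides drop it
      obtain ⟨mt, hmt⟩ := hstart
      have hswT : PySem.Str.startswith (PySem.Str.strip raw) ";" = true := by
        simp only [PySem.Str.startswith_eq, hsl]
        rw [hlineL, hmt]
        exact (PySem.Chars.startswith_iff _ _).mpr ⟨mt, rfl⟩
      have htl : (textB raw).toList = [] := by
        rw [htextL, hcs, hmt, List.append_assoc, TW_ws_append w _ hw]
        have h2 : TW ((';' :: mt) ++ v) = [] := by
          unfold TW; simp
        rw [h2, List.append_nil]
        exact strip_ws w hw
      rw [if_pos ((str_eq_empty_iff _).mpr htl), if_pos hswT]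
    · -- a real code line with an inline comment
      have hswF : PySem.Str.startswith (PySem.Str.strip raw) ";" = false := by
        rw [Bool.eq_false_iff]
        intro htr
        apply hstart
        simp only [PySem.Str.startswith_eq, hsl] at htr
        have := (semi_prefix_iff _).mp ((PySem.Chars.startswith_iff _ _).mp htr)
        rwa [hlineL] at this
      have hswF' : ¬ (PySem.Str.startswith (PySem.Str.strip raw) ";" = true) := by
        rw [hswF]; simp
      rw [if_neg hswF']
      obtain ⟨c, m', hm'⟩ : ∃ c m', PySem.Chars.strip raw.toList = c :: m' := by
        cases hmm : PySem.Chars.strip raw.toList with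
        | nil => exact absurd hmm hm_ne
        | cons a b => exact ⟨a, b, rfl⟩
      have hc_ne : c ≠ ';' := fun e => hstart ⟨m', by rw [hm', e]⟩
      have hc_ws : PySem.Chars.isspace c = false := by
        apply head_dropWhile_false raw.toList (t := m' ++ v)
        rw [hdrop, hm', List.cons_append]
      have hisinT : PySem.Str.isIn ";" (PySem.Str.strip raw) = true := by
        simp only [PySem.Str.isIn_eq, hsl]
        rw [hlineL]
        exact (PySem.Chars.isIn_iff_infix _ _).mpr ((semi_infix_iff _).mpr hmem_m)
      have hTWm : TW (PySem.Chars.strip raw.toList) = c :: TW m' := by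
        rw [hm']; unfold TW; rw [List.takeWhile_cons, if_pos (by simp [hc_ne])]
      have htb2 : (textB raw).toList = PySem.Chars.strip (TW (PySem.Chars.strip raw.toList)) := by
        rw [htextL]
        conv_lhs => rw [hcs, List.append_assoc]
        rw [TW_ws_append w _ hw, strip_ws_prefix w _ hw, TW_stop _ v hmem_m]
      have htb_ne : ¬ (textB raw = "") := by
        intro h
        have h2 : (textB raw).toList = [] := (str_eq_empty_iff _).mp h
        rw [htb2, hTWm] at h2
        exact strip_cons_nonws c _ hc_ws h2
      rw [if_neg htb_ne]
      have hX : (PySem.Str.strip ((((PySem.Str.split? (PySem.Str.strip raw) ";").getD []).headD ""))).toList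
          = PySem.Chars.strip (TW (PySem.Chars.strip raw.toList)) := by
        obtain ⟨tail, hsp⟩ := splitOn_semi (PySem.Chars.strip raw.toList)
        simp only [PySem.Str.split?, hsl, hlineL]
        rw [PySem.Chars.split?]
        simp only [List.isEmpty_cons, if_false, Bool.false_eq_true]
        rw [hsp]
        simp [PySem.Str.strip]
      rw [if_pos hisinT]
      exact congrArg some (String.ext (htb2.trans hX.symm))
  · -- no semicolon anywhere in raw
    have hfind : PySem.Chars.find raw.toList [';'] = -1 := (find_semi_neg_iff _).mpr hmem
    have htext : textB raw = PySem.Str.strip raw := by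
      unfold textB
      rw [if_pos]
      simp [PySem.Str.find, hsl, hfind]
    unfold candA
    by_cases hline : PySem.Str.strip raw = ""
    · rw [htext, if_pos hline, if_pos hline]
    · have hnotmem : ';' ∉ (PySem.Str.strip raw).toList := by
        intro hc
        apply hmem
        apply mem_strip
        simpa [PySem.Str.strip] using hc
      have hsw : PySem.Str.startswith (PySem.Str.strip raw) ";" = false := by
        rw [Bool.eq_false_iff]
        intro htr
        apply hnotmem
        simp only [PySem.Str.startswith_eq, hsl] at htr
        obtain ⟨t, ht⟩ := (semi_prefix_iff _).mp ((PySem.Chars.startswith_iff _ _).mp htr)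
        rw [ht]
        simp
      have hisin : PySem.Str.isIn ";" (PySem.Str.strip raw) = false := by
        simp only [PySem.Str.isIn_eq, hsl]
        exact (PySem.Chars.isIn_eq_false_iff _ _).mpr (fun h => hnotmem ((semi_infix_iff _).mp h))
      have hsw' : ¬ (PySem.Str.startswith (PySem.Str.strip raw) ";" = true) := by
        rw [hsw]; simp
      have hisin' : ¬ (PySem.Str.isIn ";" (PySem.Str.strip raw) = true) := by
        rw [hisin]; simp
      rw [htext, if_neg hline, if_neg hline, if_neg hsw', if_neg hisin']

-- ---------- per-line equality and loop shapes ----------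

theorem candA_none_cleanA {raw : String} (h : candA raw = none) : cleanA raw = none := by
  unfold candA at h
  unfold cleanA
  dsimp only at h ⊢
  by_cases h1 : PySem.Str.strip raw = ""
  · rw [if_pos h1]
  · rw [if_neg h1] at h ⊢
    by_cases h2 : PySem.Str.startswith (PySem.Str.strip raw) ";" = true
    · rw [if_pos h2]
    · rw [if_neg h2] at h
      exact absurd h (by simp)

theorem candA_some_cleanA {raw t : String} (h : candA raw = some t) :
    cleanA raw = (if PySem.Str.startswith t "START" || t = "END" then none
      else if PySem.Str.isIn "DC" t || PySem.Str.isIn "DS" t then none else some t) := by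
  unfold candA at h
  unfold cleanA
  dsimp only at h ⊢
  by_cases h1 : PySem.Str.strip raw = ""
  · rw [if_pos h1] at h
    exact absurd h (by simp)
  · rw [if_neg h1] at h ⊢
    by_cases h2 : PySem.Str.startswith (PySem.Str.strip raw) ";" = true
    · rw [if_pos h2] at h
      exact absurd h (by simp)
    · rw [if_neg h2] at h ⊢
      rw [Option.some.inj h]

theorem textB_none_cleanB {raw : String} (h : textB raw = "") : cleanB raw = none := by
  unfold cleanB
  dsimp only
  have hb : (textB raw == "") = true := by rw [h]; decide
  rw [hb]
  simp

theorem textB_some_cleanB {raw : String} (h : ¬ (textB raw = "")) :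
    cleanB raw = (if (!PySem.Str.startswith (textB raw) "START" && !(textB raw == "END")
        && !PySem.Str.isIn "DC" (textB raw) && !PySem.Str.isIn "DS" (textB raw))
      then some (textB raw) else none) := by
  unfold cleanB
  dsimp only
  have hb : (textB raw == "") = false := by simpa using h
  rw [hb]
  simp only [Bool.not_false, Bool.true_and]

theorem guard_eq (t : String) :
    (if PySem.Str.startswith t "START" || t = "END" then none
     else if PySem.Str.isIn "DC" t || PySem.Str.isIn "DS" t then none
     else some t)
    = (if (!PySem.Str.startswith t "START" && !(t == "END")
          && !PySem.Str.isIn "DC" t && !PySem.Str.isIn "DS" t) then some t else none : Option String) := by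
  cases h1 : PySem.Str.startswith t "START" <;> by_cases h2 : t = "END"
    <;> cases h3 : PySem.Str.isIn "DC" t <;> cases h4 : PySem.Str.isIn "DS" t
    <;> simp [*]

theorem clean_eq (raw : String) : cleanA raw = cleanB raw := by
  by_cases h : textB raw = ""
  · have hc : candA raw = none := by
      rw [← cand_eq raw]
      simp [h]
    rw [candA_none_cleanA hc, textB_none_cleanB h]
  · have hc : candA raw = some (textB raw) := by
      rw [← cand_eq raw]
      simp [h]
    rw [candA_some_cleanA hc, textB_some_cleanB h]
    exact guard_eq (textB raw)

-- A's loop step, expressed through cleanA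
theorem debugStep_eq_clean (st : List String × Int) (raw : String) :
    debugStep st raw = match cleanA raw with
      | none => st
      | some s => (st.1 ++ [fmtPC st.2 s], st.2 + 1) := by
  unfold debugStep cleanA
  dsimp only
  split_ifs <;> rfl

-- A's fold from any (acc, pc) appends the numbered survivors starting at pc
theorem debug_fold_eq (program : List String) (acc : List String) (pc : Int) :
    (program.foldl debugStep (acc, pc)).1 =
      acc ++ (PySem.List.enumerate (program.filterMap cleanA) pc).map (fun p => fmtPC p.1 p.2) := by
  induction program generalizing acc pc with
  | nil => simp
  | cons raw rest ih =>
    simp only [List.foldl_cons, List.filterMap_cons, debugStep_eq_clean]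
    cases h : cleanA raw with
    | none => simp [ih]
    | some s => simp [ih, PySem.List.enumerate_cons]

-- B's first loop collects the cleaned survivors
theorem pendStep_eq_clean (p : List String) (raw : String) :
    pendStep p raw = match cleanB raw with
      | none => p
      | some t => p ++ [t] := by
  unfold pendStep cleanB textB
  dsimp only
  split_ifs <;> rfl

theorem pend_fold (l : List String) : ∀ (acc : List String),
    l.foldl pendStep acc = acc ++ l.filterMap cleanB := by
  induction l with
  | nil => intro acc; simp
  | cons x t ih =>
    intro acc
    rw [List.foldl_cons, pendStep_eq_clean]
    cases h : cleanB x with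
    | none => simp [h, ih]
    | some s => simp [h, ih]

-- B's second loop numbers a list by the running output length
theorem trace_fold (xs : List String) : ∀ (acc : List String),
    xs.foldl traceStep acc
      = acc ++ (PySem.List.enumerate xs (acc.length : Int)).map (fun p => fmtPC p.1 p.2) := by
  induction xs with
  | nil => intro acc; simp [PySem.List.enumerate_nil]
  | cons x t ih =>
    intro acc
    rw [List.foldl_cons]
    rw [ih]
    rw [PySem.List.enumerate_cons]
    simp only [traceStep, List.length_append, List.length_cons, List.length_nil,
      List.map_cons, List.append_assoc, List.cons_append, List.nil_append]
    push_cast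
    ring_nf

theorem debug_alt_eq (program : List String) :
    debug_alt program
      = (PySem.List.enumerate (program.filterMap cleanB) 0).map (fun p => fmtPC p.1 p.2) := by
  show ((program.reverse.foldl pendStep []).reverse.foldl traceStep []) = _
  rw [pend_fold, List.nil_append, List.filterMap_reverse, List.reverse_reverse, trace_fold]
  simp

-- ===== VERDICT (by name: the statement is the Claim_ definition above) =====
theorem debug_spec : Claim_equal_debug := by
  intro program _
  unfold Spec_debug
  rw [debug_alt_eq]
  have hAB : cleanA = cleanB := funext clean_eq
  have hA := debug_fold_eq program [] 0
  unfold debug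
  rw [hA, hAB, List.nil_append]
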